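-- pv_equiv track=rewrite | github.com/pypi-data/pypi-mirror-162 | packages/code-attention-visualizer/code-attention-visualizer-0.0.4.tar.gz/code-attention-visualizer-0.0.4/codeattention/tokenizer.py | reassign_indices
-- ===== SOURCE A (Python) =====
-- def reassign_indices(tokens):
--     """Reassign the indices of the tokens."""
--     all_indices = []
--     for token in tokens:
--         all_indices.append(token['i'])
--     # create a mapping between old indices and new incremental indices
--     new_i = 0
--     mapping = {}
--     for e in sorted(set(all_indices)):
--         mapping[e] = new_i
--         new_i += 1
--     # reassign the indices
--     for token in tokens:
--         token['i'] = mapping[token['i']]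
--     return tokens
-- ===== SOURCE B (Python) =====
-- def reassign_indices(tokens):
--     """Reassign the indices of the tokens."""
--     # rank of each token's 'i' = number of distinct original indices strictly below it;
--     # no sorting and no mapping dict needed
--     origs = [t['i'] for t in tokens]
--     for t in tokens:
--         o = t['i']
--         t['i'] = len({x for x in origs if x < o})
--     return tokens
-- ===== Notes on version B (the rewrite author's own statement) =====
-- stated objective: alternative
-- what changed: B drops the sort and the old-to-new mapping dict entirely: each token's new index is computed directly as the size of the set of distinct original indices strictly smaller than its own.
import Mathlib
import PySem

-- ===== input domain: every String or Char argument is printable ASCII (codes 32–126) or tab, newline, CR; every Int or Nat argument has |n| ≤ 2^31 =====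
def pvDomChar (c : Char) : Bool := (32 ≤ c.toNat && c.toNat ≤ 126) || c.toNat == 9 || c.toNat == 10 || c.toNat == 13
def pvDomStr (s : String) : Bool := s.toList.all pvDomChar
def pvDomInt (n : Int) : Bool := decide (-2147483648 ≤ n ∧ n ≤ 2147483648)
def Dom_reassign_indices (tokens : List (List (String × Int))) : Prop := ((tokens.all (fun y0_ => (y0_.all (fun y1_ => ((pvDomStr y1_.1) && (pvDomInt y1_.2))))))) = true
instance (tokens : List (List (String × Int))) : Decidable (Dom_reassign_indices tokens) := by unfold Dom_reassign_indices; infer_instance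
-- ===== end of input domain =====

-- B replaces A's sort + old→new mapping dict by a direct count of distinct smaller indices
-- (alternative decomposition, not claimed faster). Both Pythons mutate the token dicts in
-- place and return the same list object; the equivalence proved here is about the return value.


-- token['i'] (Pre_ guarantees the key is present, so the default is never used)
def pvGetI (t : List (String × Int)) : Int := (PySem.Dict.mk t).getD "i" 0
-- token['i'] = v
def pvSetI (t : List (String × Int)) (v : Int) : List (String × Int) :=
  ((PySem.Dict.mk t).insert "i" v).items

-- ===== PORT A =====
def reassign_indices (tokens : List (List (String × Int))) : List (List (String × Int)) :=
  let all_indices := tokens.foldl (fun acc t => acc ++ [pvGetI t]) ([] : List Int)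
  -- mapping between old indices and new incremental indices
  let mapping : PySem.Dict Int Int :=
    ((PySem.List.sorted (PySem.Set.ofList all_indices) (fun e => e) false).foldl
      (fun (p : PySem.Dict Int Int × Int) e => (p.1.insert e p.2, p.2 + 1))
      (PySem.Dict.empty, 0)).1
  -- reassign the indices
  tokens.map (fun t => pvSetI t (mapping.getD (pvGetI t) 0))

-- ===== PORT B =====
def reassign_indices_alt (tokens : List (List (String × Int))) : List (List (String × Int)) :=
  let origs := tokens.map pvGetI
  tokens.map (fun t =>
    pvSetI t ((PySem.Set.ofList (origs.filter (fun x => decide (x < pvGetI t)))).length : Int))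

-- ===== PRECONDITION & SPEC =====
-- Pre_: every token dict has the key 'i' (Python A raises KeyError otherwise)
def Pre_reassign_indices (tokens : List (List (String × Int))) : Prop :=
  (tokens.all (fun t => (PySem.Dict.mk t).contains "i")) = true
instance (tokens : List (List (String × Int))) : Decidable (Pre_reassign_indices tokens) := by unfold Pre_reassign_indices; infer_instance
def pvWitness_reassign_indices : (List (List (String × Int))) := [[("i", 7)], [("i", 3)], [("i", 7)]]

def Spec_reassign_indices (tokens : List (List (String × Int))) (out : List (List (String × Int))) : Prop := out = reassign_indices_alt tokens
instance (tokens : List (List (String × Int))) (out : List (List (String × Int))) : Decidable (Spec_reassign_indices tokens out) := by unfold Spec_reassign_indices; infer_instance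

-- ===== CLAIM (what is proved, stated in full; the proofs are below) =====
def Claim_equal_reassign_indices : Prop := ∀ (tokens : List (List (String × Int))), Dom_reassign_indices tokens → Pre_reassign_indices tokens → Spec_reassign_indices tokens (reassign_indices tokens)

-- ===== LEMMAS AND PROOFS =====

-- the mapping-building fold never touches keys outside s
lemma foldl_rank_notmem (s : List Int) (d : PySem.Dict Int Int) (n : Int) (o : Int)
    (ho : o ∉ s) :
    ((s.foldl (fun (p : PySem.Dict Int Int × Int) e => (p.1.insert e p.2, p.2 + 1)) (d, n)).1).getD o 0
      = d.getD o 0 := by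
  induction s generalizing d n with
  | nil => rfl
  | cons e rest ih =>
      simp only [List.mem_cons, not_or] at ho
      simp only [List.foldl_cons]
      rw [ih _ _ ho.2, PySem.Dict.getD_insert]
      simp [ho.1]

-- the mapping built by A's fold sends o to n + (number of elements of s below o)
lemma foldl_rank (s : List Int) (d : PySem.Dict Int Int) (n : Int) (o : Int)
    (hs : s.Nodup) (hp : s.Pairwise (· < ·)) (ho : o ∈ s) :
    ((s.foldl (fun (p : PySem.Dict Int Int × Int) e => (p.1.insert e p.2, p.2 + 1)) (d, n)).1).getD o 0
      = n + (s.countP (fun x => decide (x < o)) : Int) := by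
  induction s generalizing d n with
  | nil => cases ho
  | cons e rest ih =>
      simp only [List.foldl_cons]
      rcases List.mem_cons.mp ho with h | h
      · subst h
        rw [foldl_rank_notmem _ _ _ _ (List.nodup_cons.mp hs).1]
        have h0 : rest.countP (fun x => decide (x < o)) = 0 := by
          apply List.countP_eq_zero.mpr
          intro x hx
          have := (List.pairwise_cons.mp hp).1 x hx
          simp; omega
        simp [h0, PySem.Dict.getD_insert_self]
      · have heo : e < o := (List.pairwise_cons.mp hp).1 o h
        rw [ih _ _ (List.nodup_cons.mp hs).2 (List.pairwise_cons.mp hp).2 h]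
        simp only [List.countP_cons, heo, decide_true]
        push_cast; ring

-- len(set(filter p l)) counts the distinct elements of l satisfying p
lemma len_ofList_filter (p : Int → Bool) (l : List Int) :
    (PySem.Set.ofList (l.filter p)).length = (PySem.Set.ofList l).countP p := by
  have h1 : (PySem.Set.ofList (l.filter p)).Perm ((PySem.Set.ofList l).filter p) := by
    apply (List.perm_ext_iff_of_nodup (PySem.Set.nodup_ofList _)
      ((PySem.Set.nodup_ofList l).filter p)).mpr
    intro x
    simp [PySem.Set.mem_ofList, List.mem_filter]
  rw [h1.length_eq, ← List.countP_eq_length_filter]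

-- ===== VERDICT (by name: the statement is the Claim_ definition above) =====
theorem reassign_indices_spec : Claim_equal_reassign_indices := by
  intro tokens _ _
  unfold Spec_reassign_indices reassign_indices reassign_indices_alt
  rw [PySem.List.foldl_append_singleton_eq_map]
  simp only [List.nil_append]
  apply List.map_congr_left
  intro t ht
  congr 1
  have homem : pvGetI t ∈ tokens.map pvGetI := List.mem_map_of_mem ht
  have hperm : (PySem.List.sorted (PySem.Set.ofList (tokens.map pvGetI)) (fun e => e) false).Perm
      (PySem.Set.ofList (tokens.map pvGetI)) := PySem.List.sorted_perm _ _ _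
  have hnd : (PySem.List.sorted (PySem.Set.ofList (tokens.map pvGetI)) (fun e => e) false).Nodup :=
    hperm.nodup_iff.mpr (PySem.Set.nodup_ofList _)
  have hle := PySem.List.sorted_pairwise (PySem.Set.ofList (tokens.map pvGetI)) (fun e => e)
  have hlt : (PySem.List.sorted (PySem.Set.ofList (tokens.map pvGetI)) (fun e => e) false).Pairwise
      (· < ·) := (hle.and hnd).imp (fun h => lt_of_le_of_ne h.1 h.2)
  have hos : pvGetI t ∈ PySem.List.sorted (PySem.Set.ofList (tokens.map pvGetI)) (fun e => e) false :=
    hperm.mem_iff.mpr ((PySem.Set.mem_ofList _ _).mpr homem)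
  rw [foldl_rank _ _ _ _ hnd hlt hos, hperm.countP_eq, len_ofList_filter]
  simp
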